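-- pv_equiv track=rewrite | github.com/beauthi/contests | BattleDev/112020_0/test.py | get_all_children_pair
-- ===== SOURCE A (Python) =====
-- def get_all_children_string(s):
--     """
--         gets all 2-partitions of the string s
--     """
--     children = set()
--     for bitmask in range(2**len(s)-1):
--         taken, left = [], []
--         b = 1
--         for i in range(len(s)):
--             if (b & bitmask) == 0:
--                 left += [s[i]]
--             else:
--                 taken += [s[i]]
--             b *= 2
--         children.add(("".join(taken), "".join(left)))
--     return children
--
-- def get_all_children_pair(f, d):
--     """
--         gets all pairs of strings that we can get from the pair (f,d)
--     """
--     children_f, children_d = get_all_children_string(f), get_all_children_string(d)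
--     res = set()
--     for taken_f, left_f in children_f:
--         for taken_d, left_d in children_d:
--             if left_f == left_d:
--                 res.add((taken_f, taken_d))
--     return res
-- ===== SOURCE B (Python) =====
-- def _partitions(s):
--     """all 2-partitions of s as (taken, left), taken/left keeping character order"""
--     if not s:
--         return [("", "")]
--     c, rest = s[0], s[1:]
--     return [q for t, l in _partitions(rest) for q in ((t, c + l), (c + t, l))]
--
--
-- def _proper_children(s):
--     """the distinct 2-partitions of s that leave a nonempty remainder"""
--     return list(dict.fromkeys((t, l) for t, l in _partitions(s) if l))
--
--
-- def get_all_children_pair(f, d):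
--     """
--         gets all pairs of strings that we can get from the pair (f,d)
--     """
--     children_f = _proper_children(f)
--     groups = {}
--     for taken_d, left_d in _proper_children(d):
--         groups.setdefault(left_d, []).append(taken_d)
--     res = set()
--     for taken_f, left_f in children_f:
--         for taken_d in groups.get(left_f, ()):
--             res.add((taken_f, taken_d))
--     return res
-- ===== Notes on version B (the rewrite author's own statement) =====
-- stated objective: faster
-- what changed: B generates the 2-partitions recursively (instead of a 2^n bitmask loop with an inner index scan) and replaces A's nested join over the two children sets by a hash-join (children of d grouped in a dict keyed by the leftover string, one lookup per child of f); intended as asymptotically faster - a timing run saw A time out at n=16 where B still returned, but could not verify a ratio at that size.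
import Mathlib
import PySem

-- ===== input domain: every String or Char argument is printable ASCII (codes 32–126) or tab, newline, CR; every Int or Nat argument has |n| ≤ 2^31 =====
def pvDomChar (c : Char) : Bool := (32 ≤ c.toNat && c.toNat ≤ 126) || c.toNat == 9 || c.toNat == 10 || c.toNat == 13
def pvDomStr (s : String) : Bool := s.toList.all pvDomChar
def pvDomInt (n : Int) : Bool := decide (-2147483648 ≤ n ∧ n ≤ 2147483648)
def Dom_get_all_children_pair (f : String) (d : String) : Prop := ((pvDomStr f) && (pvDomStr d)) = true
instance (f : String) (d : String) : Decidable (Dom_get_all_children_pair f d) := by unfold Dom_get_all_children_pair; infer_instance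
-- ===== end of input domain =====

-- B replaces A's bitmask enumeration by a recursive partition generator and A's
-- quadratic nested join of the two children sets by a dict keyed on the leftover string.

-- ===== PORT A =====
-- inner loop of get_all_children_string: 'for i in range(len(s))' visits the chars of s
-- in index order, so it is folded over s.toList; state is (taken, left, b)
def pvStepA (bitmask : Int) (acc : List Char × List Char × Int) (c : Char) :
    List Char × List Char × Int :=
  if PySem.Int.band acc.2.2 bitmask == 0 then (acc.1, acc.2.1 ++ [c], acc.2.2 * 2)
  else (acc.1 ++ [c], acc.2.1, acc.2.2 * 2)

def get_all_children_string (s : String) : PySem.Set (String × String) :=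
  (PySem.List.pyRange 0 ((2 : Int) ^ s.toList.length - 1) 1).foldl
    (fun children bitmask =>
      let r := s.toList.foldl (pvStepA bitmask) ([], [], 1)
      PySem.Set.add children (String.ofList r.1, String.ofList r.2.1))
    PySem.Set.empty

def get_all_children_pair (f : String) (d : String) : List (String × String) :=
  let children_f := get_all_children_string f
  let children_d := get_all_children_string d
  children_f.foldl
    (fun res p =>
      children_d.foldl
        (fun res q => if p.2 == q.2 then PySem.Set.add res (p.1, q.1) else res) res)
    PySem.Set.empty

-- ===== PORT B =====
def pvPartitions : List Char → List (List Char × List Char)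
  | [] => [([], [])]
  | c :: rest => (pvPartitions rest).flatMap (fun p => [(p.1, c :: p.2), (c :: p.1, p.2)])

def pvProperChildren (s : String) : List (String × String) :=
  PySem.List.dedup
    (((pvPartitions s.toList).filter (fun p => !p.2.isEmpty)).map
      (fun p => (String.ofList p.1, String.ofList p.2)))

def get_all_children_pair_alt (f : String) (d : String) : List (String × String) :=
  let children_f := pvProperChildren f
  let groups : PySem.Dict String (List String) :=
    (pvProperChildren d).foldl (fun g p => g.modify p.2 [] (· ++ [p.1])) PySem.Dict.empty
  children_f.foldl
    (fun res p =>
      (groups.getD p.2 []).foldl (fun res td => PySem.Set.add res (p.1, td)) res)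
    PySem.Set.empty

-- ===== PRECONDITION & SPEC =====
def Spec_get_all_children_pair (f : String) (d : String) (out : List (String × String)) : Prop := out = get_all_children_pair_alt f d
instance (f : String) (d : String) (out : List (String × String)) : Decidable (Spec_get_all_children_pair f d out) := by unfold Spec_get_all_children_pair; infer_instance

-- ===== CLAIM (what is proved, stated in full; the proofs are below) =====
def Claim_equal_get_all_children_pair : Prop := ∀ (f : String) (d : String), Dom_get_all_children_pair f d → Spec_get_all_children_pair f d (get_all_children_pair f d)

-- ===== LEMMAS AND PROOFS =====

-- pure model of A's inner bitmask loop: where each char goes for mask m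
def pvModel : List Char → Nat → List Char × List Char
  | [], _ => ([], [])
  | c :: cs, m =>
    let p := pvModel cs (m / 2)
    if m % 2 = 0 then (p.1, c :: p.2) else (c :: p.1, p.2)

theorem pvBandPow (k m : Nat) :
    (PySem.Int.band ((2 : Int) ^ k) (m : Int) == 0) = decide (m / 2 ^ k % 2 = 0) := by
  have h : ((2 : Int) ^ k) = ((2 ^ k : Nat) : Int) := by push_cast; ring
  rw [h, PySem.Int.band_natCast]
  have h2 : 2 ^ k &&& m = (m.testBit k).toNat * 2 ^ k := by
    rw [Nat.and_comm]; exact Nat.and_two_pow m k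
  rw [Nat.testBit_eq_decide_div_mod_eq] at h2
  by_cases hb : m / 2 ^ k % 2 = 1
  · simp [hb, h2]
  · have hb0 : m / 2 ^ k % 2 = 0 := by omega
    simp [hb0, h2]

theorem pvInnerA_aux (cs : List Char) (m : Nat) : ∀ (t l : List Char) (k : Nat),
    cs.foldl (pvStepA (m : Int)) (t, l, (2 : Int) ^ k) =
      (t ++ (pvModel cs (m / 2 ^ k)).1, l ++ (pvModel cs (m / 2 ^ k)).2,
        (2 : Int) ^ (k + cs.length)) := by
  induction cs with
  | nil => intro t l k; simp [pvModel]
  | cons c cs ih =>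
    intro t l k
    have hdiv : m / 2 ^ k / 2 = m / 2 ^ (k + 1) := by
      rw [Nat.div_div_eq_div_mul, pow_succ]
    have h2 : (2 : Int) ^ k * 2 = (2 : Int) ^ (k + 1) := by ring
    have hlen : k + 1 + cs.length = k + (c :: cs).length := by simp; omega
    simp only [List.foldl_cons, pvStepA, pvBandPow]
    by_cases h0 : (m / 2 ^ k) % 2 = 0
    · simp only [h0, decide_true, if_true, h2, ih, hlen]
      simp [pvModel, ← hdiv, h0]
    · simp only [h0, decide_false, Bool.false_eq_true, if_false, h2, ih, hlen]
      simp [pvModel, ← hdiv, h0]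

theorem pvInnerA_eq (cs : List Char) (m : Nat) :
    cs.foldl (pvStepA (m : Int)) ([], [], 1) =
      ((pvModel cs m).1, (pvModel cs m).2, (2 : Int) ^ cs.length) := by
  have := pvInnerA_aux cs m [] [] 0
  simpa using this

theorem pvRangeTwoMul (N : Nat) :
    List.range (2 * N) = (List.range N).flatMap (fun q => [2 * q, 2 * q + 1]) := by
  induction N with
  | zero => simp
  | succ N ih =>
    have h : 2 * (N + 1) = (2 * N + 1) + 1 := by ring
    rw [h, List.range_succ, List.range_succ, ih, List.range_succ]
    simp [List.flatMap_append]

theorem pvMapModel (cs : List Char) :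
    (List.range (2 ^ cs.length)).map (pvModel cs) = pvPartitions cs := by
  induction cs with
  | nil => simp [pvPartitions, pvModel]
  | cons c cs ih =>
    have hlen : 2 ^ (c :: cs).length = 2 * 2 ^ cs.length := by
      simp [List.length_cons, pow_succ]; ring
    rw [hlen, pvRangeTwoMul, List.map_flatMap, pvPartitions, ← ih, List.flatMap_map]
    simp only [List.flatMap_def]
    refine congrArg List.flatten (List.map_congr_left ?_)
    intro q _
    simp [pvModel, Nat.mul_mod_right, Nat.mul_add_div]

-- pvPartitions splits as "all left-nonempty" ++ [(cs, [])]
theorem pvPartitions_split (cs : List Char) :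
    ∃ ys, pvPartitions cs = ys ++ [(cs, ([] : List Char))] ∧ ∀ p ∈ ys, p.2 ≠ [] := by
  induction cs with
  | nil => exact ⟨[], by simp [pvPartitions], by simp⟩
  | cons c cs ih =>
    obtain ⟨ys, hsplit, hne⟩ := ih
    refine ⟨ys.flatMap (fun p => [(p.1, c :: p.2), (c :: p.1, p.2)]) ++ [(cs, [c])], ?_, ?_⟩
    · rw [pvPartitions, hsplit, List.flatMap_append]
      simp
    · intro p hp
      rcases List.mem_append.1 hp with h | h
      · obtain ⟨q, hq, hmem⟩ := List.mem_flatMap.1 h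
        simp only [List.mem_cons, List.not_mem_nil, or_false] at hmem
        rcases hmem with h1 | h1
        · subst h1; simp
        · subst h1; exact hne q hq
      · simp at h; subst h; simp

-- A's children set equals B's deduplicated proper-children list
theorem pvChildrenEq (s : String) : get_all_children_string s = pvProperChildren s := by
  classical
  set cs := s.toList with hcs
  obtain ⟨ys, hsplit, hne⟩ := pvPartitions_split cs
  have hlenP : (pvPartitions cs).length = 2 ^ cs.length := by
    rw [← pvMapModel]; simp
  have hNpos : 1 ≤ 2 ^ cs.length := Nat.one_le_two_pow
  -- the mask list
  have hmask : PySem.List.pyRange 0 ((2 : Int) ^ cs.length - 1) 1 =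
      List.map (fun k : Nat => (k : Int)) (List.range (2 ^ cs.length - 1)) := by
    rw [PySem.List.pyRange_one]
    have h1 : ((2 : Int) ^ cs.length) = ((2 ^ cs.length : Nat) : Int) := by push_cast; ring
    have h2 : ((2 : Int) ^ cs.length - 1 - 0).toNat = 2 ^ cs.length - 1 := by
      rw [h1]; omega
    rw [h2]
    exact List.map_congr_left (fun k _ => by omega)
  -- split range (2^n) = range (2^n - 1) ++ [2^n - 1]
  have hrange : List.range (2 ^ cs.length) =
      List.range (2 ^ cs.length - 1) ++ [2 ^ cs.length - 1] := by
    have h : 2 ^ cs.length = (2 ^ cs.length - 1) + 1 := by omega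
    conv_lhs => rw [h]
    rw [List.range_succ]
  have hmap2 : (List.range (2 ^ cs.length - 1)).map (pvModel cs) ++
      [pvModel cs (2 ^ cs.length - 1)] = ys ++ [(cs, ([] : List Char))] := by
    rw [← hsplit, ← pvMapModel, hrange]; simp
  have hlast : pvModel cs (2 ^ cs.length - 1) = (cs, []) := by
    have := (List.append_inj' hmap2 rfl).2
    simpa using this
  have hys : (List.range (2 ^ cs.length - 1)).map (pvModel cs) = ys :=
    (List.append_inj' hmap2 rfl).1
  -- the filtered partition list is ys
  have hfilter : (pvPartitions cs).filter (fun p => !p.2.isEmpty) = ys := by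
    rw [hsplit, List.filter_append]
    have h1 : ys.filter (fun p => !p.2.isEmpty) = ys := by
      apply List.filter_eq_self.2
      intro p hp
      simpa [List.isEmpty_iff] using hne p hp
    simp [h1]
  -- now compute A's side
  simp only [get_all_children_string, pvProperChildren]
  rw [← hcs, hmask, List.foldl_map, PySem.List.dedup_eq_ofList, PySem.Set.ofList_eq_foldl,
    hfilter, ← hys, List.map_map, List.foldl_map]
  have he : (PySem.Set.empty : PySem.Set (String × String)) = [] := rfl
  rw [← he]
  apply PySem.List.foldl_congr_mem
  intro acc k _
  simp only [pvInnerA_eq, Function.comp]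

-- the group dict looks up exactly the taken-parts whose leftover matches
theorem pvGroupsGetD (d : String) (lf : String) :
    ((pvProperChildren d).foldl
        (fun g p => g.modify p.2 [] (· ++ [p.1])) PySem.Dict.empty).getD lf [] =
      (((pvProperChildren d).filter (fun q => q.2 == lf)).map (·.1)) := by
  have hswap : (pvProperChildren d).foldl
      (fun g p => g.modify p.2 [] (· ++ [p.1])) PySem.Dict.empty =
      ((pvProperChildren d).map Prod.swap).foldl
        (fun g p => g.modify p.1 [] (· ++ [p.2])) PySem.Dict.empty := by
    rw [List.foldl_map]
    simp only [Prod.fst_swap, Prod.snd_swap]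
  rw [hswap, PySem.Dict.getD_foldl_modify_append]
  rw [List.filter_map, List.map_map]
  simp [Function.comp_def, Prod.swap]

theorem pv_spec (f d : String) :
    get_all_children_pair f d = get_all_children_pair_alt f d := by
  simp only [get_all_children_pair, get_all_children_pair_alt]
  rw [pvChildrenEq f, pvChildrenEq d]
  apply PySem.List.foldl_congr_mem
  intro res p _
  rw [PySem.List.foldl_if_eq_foldl_filter, pvGroupsGetD, List.foldl_map]
  rw [List.filter_congr (fun q _ => (BEq.comm (a := p.2) (b := q.2)))]

-- ===== VERDICT (by name: the statement is the Claim_ definition above) =====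
theorem get_all_children_pair_spec : Claim_equal_get_all_children_pair := by
  intro f d _
  unfold Spec_get_all_children_pair
  exact pv_spec f d
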